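-- pv_equiv track=rewrite | github.com/JoeLove100/data-structures-and-algorithms | string_algorithms/suffix_array/build_suffix_array.py | get_sorted_text
-- ===== SOURCE A (Python) =====
-- from collections import defaultdict
--
-- def get_sorted_text(text: str):
--     """
--     sort the text by using counting sort and
--     return list of sorted positions
--     """
--
--     positions = [0 for _ in range(len(text))]
--     count = defaultdict(lambda: 0)
--
--     for letter in text:
--         count[letter] += 1
--
--     all_letters = sorted(count)
--     for i, letter in enumerate(all_letters[1:]):
--         count[letter] += count[all_letters[i]]
--
--     for i in list(range(len(text)))[::-1]:
--         letter = text[i]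
--         positions[count[letter] - 1] = i
--         count[letter] -= 1
--
--     return positions
-- ===== SOURCE B (Python) =====
-- def get_sorted_text(text: str):
--     """
--     sort the text by using counting sort and
--     return list of sorted positions
--     """
--     return [i for i, _ in sorted(enumerate(text), key=lambda p: p[1])]
-- ===== Notes on version B (the rewrite author's own statement) =====
-- stated objective: idiomatic
-- what changed: Replaces the hand-written counting sort (count table, prefix sums, reverse placement pass) with a single stable comparison sort of the enumerated positions keyed by character.
import Mathlib
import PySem

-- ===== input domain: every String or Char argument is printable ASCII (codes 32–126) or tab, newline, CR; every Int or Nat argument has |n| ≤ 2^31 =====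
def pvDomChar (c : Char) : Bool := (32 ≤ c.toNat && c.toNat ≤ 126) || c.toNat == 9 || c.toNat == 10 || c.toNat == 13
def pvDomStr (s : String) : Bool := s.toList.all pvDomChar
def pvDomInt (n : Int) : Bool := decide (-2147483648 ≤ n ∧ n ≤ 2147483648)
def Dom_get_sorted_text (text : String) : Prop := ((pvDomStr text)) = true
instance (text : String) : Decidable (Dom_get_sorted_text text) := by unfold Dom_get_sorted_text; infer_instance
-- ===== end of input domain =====

-- B replaces A's hand-written counting sort (count table, prefix sums, reverse placement pass)
-- with one stable comparison sort of the enumerated positions keyed by character (idiomatic; not faster).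

-- ===== PORT A =====
-- loop bodies of A's three passes, kept as named helpers of the port
def aCountStep (d : PySem.Dict Char Int) (letter : Char) : PySem.Dict Char Int :=
  d.modify letter 0 (· + 1)

def aCumStep (all_letters : List Char) (d : PySem.Dict Char Int) (p : Int × Char) : PySem.Dict Char Int :=
  d.modify p.2 0 (· + d.getD (PySem.List.pyGetD all_letters p.1 ' ') 0)

def aPlaceStep (text : String) (st : List Int × PySem.Dict Char Int) (i : Int) :
    List Int × PySem.Dict Char Int :=
  let letter := (PySem.Str.pyGet? text i).getD ' '      -- text[i]: always in range here
  let j := st.2.getD letter 0 - 1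
  ((PySem.List.pySet? st.1 j i).getD st.1,              -- positions[j] = i: j always valid here
   st.2.modify letter 0 (· - 1))

def get_sorted_text (text : String) : List Int :=
  let n := PySem.Str.len text
  let positions := (PySem.List.pyRange 0 n).map (fun _ => (0 : Int))
  let count := text.toList.foldl aCountStep PySem.Dict.empty
  let all_letters := PySem.List.sorted count.keys (fun c => c) false
  let count2 := (PySem.List.enumerate (PySem.List.slice all_letters (some 1) none)).foldl
      (aCumStep all_letters) count
  let res := ((PySem.List.slice? (PySem.List.pyRange 0 n) none none (-1)).getD []).foldl
      (aPlaceStep text) (positions, count2)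
  res.1

-- ===== PORT B =====
def get_sorted_text_alt (text : String) : List Int :=
  (PySem.List.sorted (PySem.List.enumerate text.toList) (fun p => p.2) false).map (fun p => p.1)

-- ===== PRECONDITION & SPEC =====
def Spec_get_sorted_text (text : String) (out : List Int) : Prop := out = get_sorted_text_alt text
instance (text : String) (out : List Int) : Decidable (Spec_get_sorted_text text out) := by unfold Spec_get_sorted_text; infer_instance

-- ===== CLAIM (what is proved, stated in full; the proofs are below) =====
def Claim_equal_get_sorted_text : Prop := ∀ (text : String), Dom_get_sorted_text text → Spec_get_sorted_text text (get_sorted_text text)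

-- ===== LEMMAS AND PROOFS =====

-- the common target: positions grouped by character (blocks in increasing character
-- order, indices increasing inside a block)
def pvLp (a b : Int × Char) : Prop := a.2 < b.2 ∨ (a.2 = b.2 ∧ a.1 < b.1)

def pvOcc (cs : List Char) (c : Char) : List (Int × Char) :=
  (PySem.List.enumerate cs).filter (fun p => p.2 == c)

def pvLetters (cs : List Char) : List Char :=
  PySem.List.sorted (PySem.Set.ofList cs) (fun c => c) false

def pvG (cs : List Char) : List (Int × Char) := (pvLetters cs).flatMap (pvOcc cs)

def pvAG (cs : List Char) : List Int := (pvG cs).map (fun p => p.1)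

-- ---- enumerate facts ----
lemma mem_enum_bounds {α : Type} (cs : List α) (k : Int) :
    ∀ p ∈ PySem.List.enumerate cs k, k ≤ p.1 ∧ p.1 < k + cs.length := by
  induction cs generalizing k with
  | nil => simp [PySem.List.enumerate]
  | cons x t ih =>
    intro p hp
    rw [show PySem.List.enumerate (x :: t) k = (k, x) :: PySem.List.enumerate t (k + 1) from rfl] at hp
    rcases List.mem_cons.mp hp with rfl | hp
    · refine ⟨le_refl _, ?_⟩
      simp only [List.length_cons]
      push_cast
      omega
    · have := ih (k + 1) p hp
      simp only [List.length_cons] at *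
      push_cast at this ⊢
      omega

lemma enum_fst_pairwise {α : Type} (cs : List α) (k : Int) :
    (PySem.List.enumerate cs k).Pairwise (fun a b => a.1 < b.1) := by
  induction cs generalizing k with
  | nil => simp [PySem.List.enumerate]
  | cons x t ih =>
    rw [show PySem.List.enumerate (x :: t) k = (k, x) :: PySem.List.enumerate t (k + 1) from rfl]
    refine List.pairwise_cons.mpr ⟨fun p hp => ?_, ih (k + 1)⟩
    have := (mem_enum_bounds t (k + 1) p hp).1
    simp only []
    omega

lemma enum_length {α : Type} (cs : List α) (k : Int) :
    (PySem.List.enumerate cs k).length = cs.length := by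
  induction cs generalizing k with
  | nil => rfl
  | cons x t ih =>
    rw [show PySem.List.enumerate (x :: t) k = (k, x) :: PySem.List.enumerate t (k + 1) from rfl]
    simp [ih]

lemma mem_enum_snd {α : Type} (cs : List α) (k : Int) :
    ∀ p ∈ PySem.List.enumerate cs k, p.2 ∈ cs := by
  induction cs generalizing k with
  | nil => simp [PySem.List.enumerate]
  | cons x t ih =>
    intro p hp
    rw [show PySem.List.enumerate (x :: t) k = (k, x) :: PySem.List.enumerate t (k + 1) from rfl] at hp
    rcases List.mem_cons.mp hp with rfl | hp
    · simp
    · exact List.mem_cons_of_mem _ (ih (k + 1) p hp)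

lemma enum_getElem? {α : Type} (cs : List α) (k : Int) (i : Nat) (h : i < cs.length) :
    (PySem.List.enumerate cs k)[i]? = some (k + i, cs[i]) := by
  induction cs generalizing k i with
  | nil => simp at h
  | cons x t ih =>
    rw [show PySem.List.enumerate (x :: t) k = (k, x) :: PySem.List.enumerate t (k + 1) from rfl]
    cases i with
    | zero => simp
    | succ j =>
      simp only [List.getElem?_cons_succ, List.getElem_cons_succ]
      rw [ih (k + 1) j (by simpa using h)]
      congr 2
      push_cast
      ring

-- ---- counting facts ----
lemma countP_disj (cs : List Char) (p q : Char → Bool) (h : ∀ x, ¬(p x = true ∧ q x = true)) :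
    cs.countP (fun x => p x || q x) = cs.countP p + cs.countP q := by
  induction cs with
  | nil => simp
  | cons a t ih =>
    have ha := h a
    by_cases hp : p a = true
    · by_cases hq : q a = true
      · exact absurd ⟨hp, hq⟩ ha
      · simp [List.countP_cons, hp, hq, ih]
        try omega
    · by_cases hq : q a = true
      · simp [List.countP_cons, hp, hq, ih]
        try omega
      · simp [List.countP_cons, hp, hq, ih]
        try omega

lemma countP_mem_nodup (cs : List Char) (l : List Char) (hnd : l.Nodup) :
    cs.countP (fun x => decide (x ∈ l)) = (l.map (fun c => cs.countP (fun x => x == c))).sum := by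
  induction l with
  | nil => simp
  | cons c l ih =>
    have hc : c ∉ l := (List.nodup_cons.mp hnd).1
    have hstep : cs.countP (fun x => decide (x ∈ c :: l)) =
        cs.countP (fun x => x == c) + cs.countP (fun x => decide (x ∈ l)) := by
      rw [← countP_disj cs (fun x => x == c) (fun x => decide (x ∈ l))
            (fun x hx => hc ((eq_of_beq hx.1) ▸ (of_decide_eq_true hx.2)))]
      refine List.countP_congr (fun x _ => ?_)
      simp [List.mem_cons]
    rw [hstep, ih (List.nodup_cons.mp hnd).2]
    simp

-- ---- occurrence-list facts ----
lemma occ_length (cs : List Char) (c : Char) (k : Int) :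
    ((PySem.List.enumerate cs k).filter (fun p => p.2 == c)).length
      = cs.countP (fun x => x == c) := by
  induction cs generalizing k with
  | nil => simp [PySem.List.enumerate]
  | cons x t ih =>
    rw [show PySem.List.enumerate (x :: t) k = (k, x) :: PySem.List.enumerate t (k + 1) from rfl]
    by_cases hx : (x == c) = true <;>
      simp [List.countP_cons, hx, ih (k + 1)]

lemma occ_getElem? (cs : List Char) (c : Char) (k : Int) (i : Nat) (h : i < cs.length)
    (hc : cs[i] = c) :
    ((PySem.List.enumerate cs k).filter (fun p => p.2 == c))[(cs.take i).countP (fun x => x == c)]?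
      = some (k + i, c) := by
  induction cs generalizing k i with
  | nil => simp at h
  | cons x t ih =>
    rw [show PySem.List.enumerate (x :: t) k = (k, x) :: PySem.List.enumerate t (k + 1) from rfl]
    have hfil : List.filter (fun p : Int × Char => p.2 == c) ((k, x) :: PySem.List.enumerate t (k + 1))
        = if (x == c) = true then
            (k, x) :: (PySem.List.enumerate t (k + 1)).filter (fun p => p.2 == c)
          else (PySem.List.enumerate t (k + 1)).filter (fun p => p.2 == c) := by
      by_cases hx : (x == c) = true <;> simp [List.filter_cons, hx]
    rw [hfil]
    cases i with
    | zero =>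
      have hxc : x = c := by simpa using hc
      rw [if_pos (by simp [hxc])]
      simp [hxc]
    | succ j =>
      simp only [List.getElem_cons_succ] at hc
      have hj : j < t.length := by simpa using h
      have hrec := ih (k + 1) j hj hc
      by_cases hx : (x == c) = true
      · rw [if_pos hx, List.take_succ_cons]
        simp only [List.countP_cons, hx, if_pos, List.getElem?_cons_succ]
        rw [hrec]
        congr 2
        push_cast
        ring
      · rw [if_neg hx, List.take_succ_cons]
        simp only [List.countP_cons, hx]
        simp only [Bool.false_eq_true, if_false, add_zero]
        rw [hrec]
        congr 2
        push_cast
        ring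

-- ---- letters facts ----
lemma letters_pairwise (cs : List Char) : (pvLetters cs).Pairwise (· < ·) := by
  exact PySem.List.sorted_ofList_pairwise_lt cs

lemma letters_mem (cs : List Char) (c : Char) : c ∈ pvLetters cs ↔ c ∈ cs := by
  unfold pvLetters
  rw [PySem.List.mem_sorted]
  exact PySem.Set.mem_ofList cs c

lemma letters_nodup (cs : List Char) : (pvLetters cs).Nodup := by
  exact (letters_pairwise cs).imp (fun h => ne_of_lt h)

-- ---- pvG facts ----
lemma pvG_pairwise (cs : List Char) : (pvG cs).Pairwise pvLp := by
  unfold pvG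
  rw [List.pairwise_flatMap]
  constructor
  · intro c _
    unfold pvOcc
    refine List.Pairwise.imp_of_mem ?_ ((enum_fst_pairwise cs 0).filter _)
    intro a b ha hb hab
    have ha2 : a.2 = c := by simpa using (List.mem_filter.mp ha).2
    have hb2 : b.2 = c := by simpa using (List.mem_filter.mp hb).2
    exact Or.inr ⟨ha2.trans hb2.symm, hab⟩
  · refine (letters_pairwise cs).imp ?_
    intro c1 c2 h x hx y hy
    have hx2 : x.2 = c1 := by simpa using (List.mem_filter.mp hx).2
    have hy2 : y.2 = c2 := by simpa using (List.mem_filter.mp hy).2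
    exact Or.inl (by rw [hx2, hy2]; exact h)

lemma pvLp_ne (a b : Int × Char) : pvLp a b → a ≠ b := by
  rintro (h | ⟨_, h⟩) rfl
  · exact lt_irrefl _ h
  · exact lt_irrefl _ h

lemma enum_nodup {α : Type} (cs : List α) (k : Int) : (PySem.List.enumerate cs k).Nodup :=
  (enum_fst_pairwise cs k).imp (fun h heq => by subst heq; exact lt_irrefl _ h)

lemma mem_pvG (cs : List Char) (p : Int × Char) :
    p ∈ pvG cs ↔ p ∈ PySem.List.enumerate cs 0 := by
  unfold pvG pvOcc
  rw [List.mem_flatMap]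
  constructor
  · rintro ⟨c, _, hp⟩
    exact (List.mem_filter.mp hp).1
  · intro hp
    refine ⟨p.2, (letters_mem cs p.2).mpr (mem_enum_snd cs 0 p hp), ?_⟩
    exact List.mem_filter.mpr ⟨hp, by simp⟩

lemma pvG_perm (cs : List Char) : (pvG cs).Perm (PySem.List.enumerate cs 0) := by
  refine (List.perm_ext_iff_of_nodup ?_ (enum_nodup cs 0)).mpr (mem_pvG cs)
  exact (pvG_pairwise cs).imp (fun {a b} h => pvLp_ne a b h)

lemma pvG_length (cs : List Char) : (pvG cs).length = cs.length := by
  rw [(pvG_perm cs).length_eq, enum_length]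

lemma pvAG_nodup (cs : List Char) : (pvAG cs).Nodup := by
  unfold pvAG
  have h1 : (List.map (fun p : Int × Char => p.1) (PySem.List.enumerate cs 0)).Nodup := by
    refine List.Pairwise.imp (fun h => ne_of_lt h) ?_
    exact (List.pairwise_map).mpr (enum_fst_pairwise cs 0)
  exact ((pvG_perm cs).map (fun p => p.1)).symm.nodup h1

lemma pvAG_mem_bounds (cs : List Char) : ∀ v ∈ pvAG cs, 0 ≤ v ∧ v < cs.length := by
  intro v hv
  obtain ⟨p, hp, rfl⟩ := List.mem_map.mp hv
  have := mem_enum_bounds cs 0 p ((mem_pvG cs p).mp hp)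
  omega

lemma countP_take_lt (cs : List Char) (i : Nat) (h : i < cs.length) :
    (cs.take i).countP (fun x => x == cs[i]) < cs.countP (fun x => x == cs[i]) := by
  have key : (cs.take i).countP (fun x => x == cs[i]) + (cs.drop i).countP (fun x => x == cs[i])
      = cs.countP (fun x => x == cs[i]) := by
    rw [← List.countP_append, List.take_append_drop]
  rw [← key, List.drop_eq_getElem_cons h, List.countP_cons]
  simp

lemma pvG_getElem? (cs : List Char) (i : Nat) (h : i < cs.length) :
    (pvG cs)[cs.countP (fun x => decide (x < cs[i])) + (cs.take i).countP (fun x => x == cs[i])]?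
      = some ((i : Int), cs[i]) := by
  obtain ⟨l1, l2, hsplit⟩ := List.append_of_mem ((letters_mem cs cs[i]).mpr (List.getElem_mem h))
  have hpw := letters_pairwise cs
  rw [hsplit, List.pairwise_append] at hpw
  obtain ⟨hpw1, hpw2, hcross⟩ := hpw
  have hl1lt : ∀ x ∈ l1, x < cs[i] := fun x hx => hcross x hx _ (by simp)
  have hl2gt : ∀ x ∈ l2, cs[i] < x := (List.pairwise_cons.mp hpw2).1
  have hnd := letters_nodup cs
  rw [hsplit] at hnd
  have hl1nd : l1.Nodup := (List.nodup_append.mp hnd).1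
  have hlen1 : (l1.flatMap (pvOcc cs)).length = cs.countP (fun x => decide (x < cs[i])) := by
    rw [List.length_flatMap]
    have hmapeq : l1.map (fun c' => (pvOcc cs c').length) = l1.map (fun c' => cs.countP (fun x => x == c')) :=
      List.map_congr_left (fun c' _ => occ_length cs c' 0)
    rw [hmapeq, ← countP_mem_nodup cs l1 hl1nd]
    refine List.countP_congr (fun x hx => ?_)
    simp only [decide_eq_true_eq]
    constructor
    · exact fun hxl => hl1lt x hxl
    · intro hlt
      have hxl : x ∈ pvLetters cs := (letters_mem cs x).mpr hx
      rw [hsplit] at hxl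
      rcases List.mem_append.mp hxl with h1 | h2
      · exact h1
      · rcases List.mem_cons.mp h2 with rfl | h2
        · exact absurd hlt (lt_irrefl _)
        · exact absurd hlt (asymm (hl2gt x h2))
  unfold pvG
  rw [hsplit, List.flatMap_append, List.flatMap_cons]
  have hidx : (l1.flatMap (pvOcc cs)).length ≤
      cs.countP (fun x => decide (x < cs[i])) + (cs.take i).countP (fun x => x == cs[i]) := by
    rw [hlen1]; omega
  rw [List.getElem?_append_right hidx]
  rw [show cs.countP (fun x => decide (x < cs[i])) + (cs.take i).countP (fun x => x == cs[i])
        - (l1.flatMap (pvOcc cs)).length = (cs.take i).countP (fun x => x == cs[i]) from by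
      rw [hlen1]; omega]
  rw [List.getElem?_append_left (by
    unfold pvOcc
    rw [occ_length]
    exact countP_take_lt cs i h)]
  unfold pvOcc
  rw [occ_getElem? cs cs[i] 0 i h rfl]
  norm_num

-- ---- B side: stability of the insertion sort ----
lemma pvLp_snd_le (a b : Int × Char) : pvLp a b → a.2 ≤ b.2 := by
  rintro (h | ⟨h, _⟩)
  · exact le_of_lt h
  · exact le_of_eq h

lemma insertBy_pairwise (x : Int × Char) (acc : List (Int × Char))
    (h1 : acc.Pairwise pvLp) (h2 : ∀ y ∈ acc, y.1 < x.1) :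
    (PySem.List.insertBy (fun a b => decide (a.2 < b.2)) x acc).Pairwise pvLp := by
  induction acc with
  | nil => simp [PySem.List.insertBy, List.pairwise_cons]
  | cons y t ih =>
    rw [show PySem.List.insertBy (fun a b => decide (a.2 < b.2)) x (y :: t)
        = if decide (x.2 < y.2) = true then x :: y :: t
          else y :: PySem.List.insertBy (fun a b => decide (a.2 < b.2)) x t from rfl]
    by_cases hxy : x.2 < y.2
    · rw [if_pos (by simpa using hxy)]
      refine List.pairwise_cons.mpr ⟨?_, h1⟩
      intro z hz
      rcases List.mem_cons.mp hz with rfl | hz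
      · exact Or.inl hxy
      · exact Or.inl (lt_of_lt_of_le hxy (pvLp_snd_le _ _ ((List.pairwise_cons.mp h1).1 z hz)))
    · rw [if_neg (by simpa using hxy)]
      refine List.pairwise_cons.mpr ⟨?_, ih (List.pairwise_cons.mp h1).2
        (fun z hz => h2 z (List.mem_cons_of_mem _ hz))⟩
      intro z hz
      rcases (PySem.List.mem_insertBy _ x z t).mp hz with rfl | hz
      · rcases lt_or_eq_of_le (le_of_not_gt hxy) with hlt | heq
        · exact Or.inl hlt
        · exact Or.inr ⟨heq, h2 y (by simp)⟩
      · exact (List.pairwise_cons.mp h1).1 z hz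

lemma foldl_insertBy_pairwise (rest : List (Int × Char)) :
    ∀ acc : List (Int × Char), acc.Pairwise pvLp →
      rest.Pairwise (fun a b => a.1 < b.1) →
      (∀ y ∈ acc, ∀ x ∈ rest, y.1 < x.1) →
      (rest.foldl (fun acc x => PySem.List.insertBy (fun a b => decide (a.2 < b.2)) x acc) acc).Pairwise pvLp := by
  induction rest with
  | nil => intro acc h1 _ _; simpa using h1
  | cons x r ih =>
    intro acc h1 hr h3
    simp only [List.foldl_cons]
    refine ih _ (insertBy_pairwise x acc h1 (fun y hy => h3 y hy x (by simp)))
      (List.pairwise_cons.mp hr).2 ?_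
    intro y hy z hz
    rcases (PySem.List.mem_insertBy _ x y acc).mp hy with rfl | hy
    · exact (List.pairwise_cons.mp hr).1 z hz
    · exact h3 y hy z (List.mem_cons_of_mem _ hz)

lemma sorted_enum_pairwise (cs : List Char) :
    (PySem.List.sorted (PySem.List.enumerate cs) (fun p => p.2) false).Pairwise pvLp := by
  rw [PySem.List.sorted_eq_foldl_insertBy]
  exact foldl_insertBy_pairwise _ [] List.Pairwise.nil (enum_fst_pairwise cs 0) (by simp)

lemma B_eq_pvG (cs : List Char) :
    PySem.List.sorted (PySem.List.enumerate cs) (fun p => p.2) false = pvG cs := by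
  refine List.eq_of_perm_of_sorted (le := pvLp) ?_ (sorted_enum_pairwise cs) (pvG_pairwise cs)
    ((PySem.List.sorted_perm _ _ _).trans (pvG_perm cs).symm)
  intro a b _ _ hab hba
  exfalso
  rcases hab with hlt | ⟨heq, hlt⟩ <;> rcases hba with hlt' | ⟨heq', hlt'⟩
  · exact absurd hlt' (lt_asymm hlt)
  · rw [heq'] at hlt; exact lt_irrefl _ hlt
  · rw [heq] at hlt'; exact lt_irrefl _ hlt'
  · exact lt_irrefl _ (hlt.trans hlt')

-- ---- A side: the counting dictionary after the prefix-sum loop ----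
lemma pairwise_lt_take_mem (l : List Char) (hp : l.Pairwise (· < ·)) (s : Nat) (hs : s < l.length) :
    ∀ x ∈ l.take s, x < l[s] := by
  intro x hx
  obtain ⟨u, hu, hux⟩ := List.mem_iff_getElem.mp hx
  have hu' : u < s := by
    simp [List.length_take] at hu
    omega
  rw [List.getElem_take] at hux
  rw [← hux]
  exact List.pairwise_iff_getElem.mp hp u s (by omega) hs hu'

lemma take_succ_of_lt {α : Type} (l : List α) (s : Nat) (h : s < l.length) :
    l.take (s + 1) = l.take s ++ [l[s]] := by
  rw [List.take_succ, List.getElem?_eq_getElem h]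
  rfl

lemma take_mem_le (l : List Char) (hp : l.Pairwise (· < ·)) (s : Nat) (hs : s < l.length) :
    ∀ x ∈ l.take (s + 1), x ≤ l[s] := by
  intro x hx
  rw [take_succ_of_lt l s hs, List.mem_append, List.mem_singleton] at hx
  rcases hx with hx | rfl
  · exact le_of_lt (pairwise_lt_take_mem l hp s hs x hx)
  · exact le_refl _

lemma countP_take_extend (cs l : List Char) (hp : l.Pairwise (· < ·)) (s : Nat) (hs : s < l.length) :
    cs.countP (fun x => decide (x ∈ l.take (s + 1)))
      = cs.countP (fun x => decide (x ∈ l.take s)) + cs.countP (fun x => x == l[s]) := by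
  have hfun : (fun x => decide (x ∈ l.take (s + 1)))
      = (fun x => decide (x ∈ l.take s) || (x == l[s])) := by
    funext x
    have hiff : x ∈ l.take (s + 1) ↔ (x ∈ l.take s ∨ x = l[s]) := by
      rw [take_succ_of_lt l s hs, List.mem_append, List.mem_singleton]
    have hmem : l[s] ∈ l.take (s + 1) := by
      rw [take_succ_of_lt l s hs]
      exact List.mem_append.mpr (Or.inr (List.mem_singleton.mpr rfl))
    by_cases h1 : x ∈ l.take s <;> by_cases h2 : x = l[s] <;> simp [hiff, h1, h2, hmem]
  rw [hfun]
  refine countP_disj cs _ _ (fun x hx => ?_)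
  have h1 := of_decide_eq_true hx.1
  have h2 := eq_of_beq hx.2
  have := pairwise_lt_take_mem l hp s hs x h1
  rw [h2] at this
  exact lt_irrefl _ this

lemma aCumStep_eq (al : List Char) (d : PySem.Dict Char Int) (p : Int × Char) :
    aCumStep al d p = d.modify p.2 0 (fun v => v + d.getD (PySem.List.pyGetD al p.1 ' ') 0) := rfl

lemma getElem_index_eq {α : Type} (l : List α) (a b : Nat) (hab : a = b) (ha : a < l.length) :
    l[a] = l[b]'(hab ▸ ha) := by
  subst hab
  rfl

lemma cum_inv (cs : List Char) :
    ∀ (t : Nat), t + 1 ≤ (pvLetters cs).length → ∀ c : Char,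
      ((List.take t (PySem.List.enumerate (List.drop 1 (pvLetters cs)) 0)).foldl
          (aCumStep (pvLetters cs)) (PySem.Dict.counter cs)).getD c 0
        = if c ∈ pvLetters cs ∧ (pvLetters cs).idxOf c ≤ t
          then ((cs.countP (fun x => decide (x ∈ (pvLetters cs).take ((pvLetters cs).idxOf c + 1)))) : Int)
          else ((cs.countP (fun x => x == c)) : Int) := by
  intro t
  induction t with
  | zero =>
    intro ht c
    simp only [List.take_zero, List.foldl_nil]
    rw [PySem.Dict.getD_counter]
    rw [show List.count c cs = cs.countP (fun x => x == c) from rfl]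
    by_cases hc : c ∈ pvLetters cs ∧ (pvLetters cs).idxOf c ≤ 0
    · rw [if_pos hc]
      obtain ⟨hcm, hidx⟩ := hc
      have h0 : (pvLetters cs).idxOf c = 0 := Nat.le_zero.mp hidx
      have hlen : 0 < (pvLetters cs).length := by
        cases hL0 : pvLetters cs with
        | nil => rw [hL0] at hcm; simp at hcm
        | cons a t => simp
      have hc0 : (pvLetters cs)[0] = c := by
        have hx := List.getElem_idxOf (x := c) (xs := pvLetters cs) (by rw [h0]; exact hlen)
        exact (getElem_index_eq _ 0 ((pvLetters cs).idxOf c) h0.symm hlen).trans hx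
      rw [h0, countP_take_extend cs (pvLetters cs) (letters_pairwise cs) 0 hlen, hc0]
      simp
    · rw [if_neg hc]
  | succ t iht =>
    intro ht c
    have hL : t + 1 < (pvLetters cs).length := by omega
    have htd : t < (List.drop 1 (pvLetters cs)).length := by
      rw [List.length_drop]; omega
    have henum : (PySem.List.enumerate (List.drop 1 (pvLetters cs)) 0)[t]?
        = some ((0 : Int) + t, (List.drop 1 (pvLetters cs))[t]) := enum_getElem? _ 0 t htd
    rw [List.take_succ, henum]
    rw [show (some ((0 : Int) + t, (List.drop 1 (pvLetters cs))[t])).toList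
        = [((0 : Int) + t, (List.drop 1 (pvLetters cs))[t])] from rfl]
    rw [List.foldl_append, List.foldl_cons, List.foldl_nil]
    have hdropt : (List.drop 1 (pvLetters cs))[t] = (pvLetters cs)[t + 1]'hL := by
      rw [List.getElem_drop]
      exact getElem_index_eq _ (1 + t) (t + 1) (by omega) (by omega)
    have hpg : PySem.List.pyGetD (pvLetters cs) ((0 : Int) + t) ' ' = (pvLetters cs)[t]'(by omega) := by
      rw [PySem.List.pyGetD_eq_getElem _ _ (by omega) (by push_cast; omega)]
      congr 1
      omega
    rw [hdropt, aCumStep_eq]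
    try dsimp only
    rw [PySem.Dict.getD_modify, hpg]
    have hidxt : (pvLetters cs).idxOf ((pvLetters cs)[t]'(by omega)) = t :=
      List.Nodup.idxOf_getElem (letters_nodup cs) t (by omega)
    have hidxt1 : (pvLetters cs).idxOf ((pvLetters cs)[t + 1]'hL) = t + 1 :=
      List.Nodup.idxOf_getElem (letters_nodup cs) (t + 1) hL
    by_cases hceq : c = (pvLetters cs)[t + 1]'hL
    · rw [if_pos hceq]
      have hDt := iht (by omega) ((pvLetters cs)[t]'(by omega))
      rw [if_pos ⟨List.getElem_mem _, le_of_eq hidxt⟩, hidxt] at hDt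
      have hDt1 := iht (by omega) ((pvLetters cs)[t + 1]'hL)
      rw [if_neg (fun hcon => by have h2 := hcon.2; rw [hidxt1] at h2; omega)] at hDt1
      try dsimp only
      rw [hDt1, hDt]
      rw [if_pos ⟨by rw [hceq]; exact List.getElem_mem _, by rw [hceq, hidxt1]⟩]
      rw [show (pvLetters cs).idxOf c = t + 1 from by rw [hceq, hidxt1]]
      rw [countP_take_extend cs (pvLetters cs) (letters_pairwise cs) (t + 1) hL]
      push_cast
      ring
    · rw [if_neg hceq]
      rw [iht (by omega) c]
      by_cases hmem : c ∈ pvLetters cs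
      · by_cases hle : (pvLetters cs).idxOf c ≤ t
        · rw [if_pos ⟨hmem, hle⟩, if_pos ⟨hmem, by omega⟩]
        · have hgt : ¬ ((pvLetters cs).idxOf c ≤ t + 1) := by
            intro hcon
            have heq : (pvLetters cs).idxOf c = t + 1 := by omega
            have hlt : (pvLetters cs).idxOf c < (pvLetters cs).length := by
              obtain ⟨u, hu, huc⟩ := List.mem_iff_getElem.mp hmem
              rw [← huc, List.Nodup.idxOf_getElem (letters_nodup cs) u hu]
              exact hu
            have hcg := List.getElem_idxOf (x := c) (xs := pvLetters cs) hlt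
            apply hceq
            rw [← hcg]
            exact getElem_index_eq _ ((pvLetters cs).idxOf c) (t + 1) heq hlt
          rw [if_neg (fun hcon => hle hcon.2), if_neg (fun hcon => hgt hcon.2)]
      · rw [if_neg (fun hcon => hmem hcon.1), if_neg (fun hcon => hmem hcon.1)]

lemma cum_loop (cs : List Char) (c : Char) :
    ((PySem.List.enumerate (PySem.List.slice (pvLetters cs) (some 1) none)).foldl
        (aCumStep (pvLetters cs)) (PySem.Dict.counter cs)).getD c 0
      = if c ∈ cs then (cs.countP (fun x => decide (x ≤ c)) : Int) else 0 := by
  have hsl : PySem.List.slice (pvLetters cs) (some 1) none = List.drop 1 (pvLetters cs) := by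
    have h := PySem.List.slice_from (pvLetters cs) (a := (1 : Int)) (by norm_num)
    simpa using h
  rw [hsl]
  by_cases hL0 : (pvLetters cs).length = 0
  · have hnil : pvLetters cs = [] := List.length_eq_zero_iff.mp hL0
    rw [hnil]
    simp only [List.drop_nil]
    rw [show PySem.List.enumerate ([] : List Char) 0 = [] from rfl]
    simp only [List.foldl_nil]
    rw [PySem.Dict.getD_counter]
    have hc : c ∉ cs := fun hcm => by
      have h2 := (letters_mem cs c).mpr hcm
      rw [hnil] at h2
      simp at h2
    rw [if_neg hc]
    rw [List.count_eq_zero.mpr hc]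
    rfl
  · have hlen : (PySem.List.enumerate (List.drop 1 (pvLetters cs)) 0).length
        = (pvLetters cs).length - 1 := by
      rw [enum_length, List.length_drop]
    have hfull : PySem.List.enumerate (List.drop 1 (pvLetters cs)) 0
        = List.take ((pvLetters cs).length - 1) (PySem.List.enumerate (List.drop 1 (pvLetters cs)) 0) := by
      rw [← hlen, List.take_length]
    have hinv := cum_inv cs ((pvLetters cs).length - 1) (by omega) c
    rw [← hfull] at hinv
    rw [hinv]
    by_cases hcc : c ∈ cs
    · have hcl : c ∈ pvLetters cs := (letters_mem cs c).mpr hcc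
      obtain ⟨u, hu, huc⟩ := List.mem_iff_getElem.mp hcl
      have hidxu : (pvLetters cs).idxOf c = u := by
        rw [← huc, List.Nodup.idxOf_getElem (letters_nodup cs) u hu]
      rw [if_pos ⟨hcl, by omega⟩, if_pos hcc, hidxu]
      congr 1
      refine List.countP_congr (fun x hx => ?_)
      simp only [decide_eq_true_eq]
      constructor
      · intro hxt
        have hxle := take_mem_le (pvLetters cs) (letters_pairwise cs) u hu x hxt
        rw [huc] at hxle
        exact hxle
      · intro hxle
        obtain ⟨w, hw, hwx⟩ := List.mem_iff_getElem.mp ((letters_mem cs x).mpr hx)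
        have hwle : w ≤ u := by
          by_contra hgt
          have := List.pairwise_iff_getElem.mp (letters_pairwise cs) u w hu hw (by omega)
          rw [huc, hwx] at this
          exact absurd hxle (not_le_of_gt this)
        refine List.mem_iff_getElem.mpr ⟨w, ?_, ?_⟩
        · simp [List.length_take]
          omega
        · rw [List.getElem_take]
          exact hwx
    · rw [if_neg (fun hcon => hcc ((letters_mem cs c).mp hcon.1)), if_neg hcc]
      rw [List.countP_eq_zero.mpr (fun a ha hbeq => hcc (by rw [← eq_of_beq hbeq]; exact ha))]
      rfl

-- ---- A side: the placement loop ----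
lemma pvAG_length (cs : List Char) : (pvAG cs).length = cs.length := by
  unfold pvAG
  rw [List.length_map, pvG_length]

lemma jn_lt (cs : List Char) (i : Nat) (h : i < cs.length) :
    cs.countP (fun x => decide (x < cs[i])) + (cs.take i).countP (fun x => x == cs[i]) < cs.length := by
  have h1 := countP_take_lt cs i h
  have h2 : cs.countP (fun x => decide (x < cs[i])) + cs.countP (fun x => x == cs[i]) ≤ cs.length := by
    rw [← countP_disj cs _ _ (fun x hx => by
      have hlt := of_decide_eq_true hx.1
      have heq := eq_of_beq hx.2
      rw [heq] at hlt
      exact lt_irrefl _ hlt)]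
    exact List.countP_le_length
  omega

lemma pySet?_some {α : Type} (xs : List α) (jj : Int) (v : α) (h0 : 0 ≤ jj) (h1 : jj < xs.length) :
    PySem.List.pySet? xs jj v = some (xs.set jj.toNat v) := by
  simp [PySem.List.pySet?, PySem.List.pyIdx?, h0, h1]

lemma nodup_getElem?_inj {α : Type} (l : List α) (hnd : l.Nodup) (a b : Nat) (v : α)
    (ha : l[a]? = some v) (hb : l[b]? = some v) : a = b := by
  have ha' : a < l.length := by
    by_contra hc
    rw [List.getElem?_eq_none (by omega)] at ha
    simp at ha
  have hb' : b < l.length := by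
    by_contra hc
    rw [List.getElem?_eq_none (by omega)] at hb
    simp at hb
  rw [List.getElem?_eq_getElem ha'] at ha
  rw [List.getElem?_eq_getElem hb'] at hb
  have hv : l[a] = l[b] := by
    rw [Option.some_inj] at ha hb
    rw [ha, hb]
  rcases Nat.lt_trichotomy a b with hab | hab | hab
  · exact absurd hv (List.pairwise_iff_getElem.mp hnd a b ha' hb' hab)
  · exact hab
  · exact absurd hv.symm (List.pairwise_iff_getElem.mp hnd b a hb' ha' hab)

lemma aPlaceStep_eq (text : String) (st : List Int × PySem.Dict Char Int) (i : Int) :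
    aPlaceStep text st i
      = ((PySem.List.pySet? st.1 (st.2.getD ((PySem.Str.pyGet? text i).getD ' ') 0 - 1) i).getD st.1,
         st.2.modify ((PySem.Str.pyGet? text i).getD ' ') 0 (fun v => v - 1)) := rfl

lemma set_trunc (cs : List Char) (i : Nat) (h : i < cs.length) :
    ((pvAG cs).map (fun v => if ((i + 1 : Nat) : Int) ≤ v then v else 0)).set
        (cs.countP (fun x => decide (x < cs[i])) + (cs.take i).countP (fun x => x == cs[i])) (i : Int)
      = (pvAG cs).map (fun v => if (i : Int) ≤ v then v else 0) := by
  have hjl := jn_lt cs i h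
  have hAGj : (pvAG cs)[cs.countP (fun x => decide (x < cs[i]))
      + (cs.take i).countP (fun x => x == cs[i])]? = some (i : Int) := by
    unfold pvAG
    rw [List.getElem?_map, pvG_getElem? cs i h]
    rfl
  apply List.ext_getElem
  · simp
  intro m hm1 hm2
  rw [List.getElem_set]
  have hmlen : m < (pvAG cs).length := by simpa using hm2
  by_cases hmj : cs.countP (fun x => decide (x < cs[i])) + (cs.take i).countP (fun x => x == cs[i]) = m
  · rw [if_pos hmj]
    have hsome : (pvAG cs)[m]? = some (i : Int) := by rw [← hmj]; exact hAGj
    have hAGm : (pvAG cs)[m]'hmlen = (i : Int) := by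
      rw [List.getElem?_eq_getElem hmlen, Option.some_inj] at hsome
      exact hsome
    rw [List.getElem_map, hAGm, if_pos (le_refl _)]
  · rw [if_neg hmj]
    rw [List.getElem_map, List.getElem_map]
    have hne : (pvAG cs)[m]'hmlen ≠ (i : Int) := by
      intro hcon
      apply hmj
      refine nodup_getElem?_inj (pvAG cs) (pvAG_nodup cs) _ m (i : Int) hAGj ?_
      rw [List.getElem?_eq_getElem hmlen, hcon]
    have hb := (pvAG_mem_bounds cs ((pvAG cs)[m]'hmlen) (List.getElem_mem hmlen)).1
    split_ifs with hA hB
    · rfl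
    · exfalso
      push_cast at hA
      omega
    · exfalso
      push_cast at hA
      omega
    · rfl
lemma place_loop (text : String) (i : Nat) (hi : i ≤ text.toList.length)
    (d0 : PySem.Dict Char Int)
    (hd0 : ∀ c, d0.getD c 0 = if c ∈ text.toList then (text.toList.countP (fun x => decide (x ≤ c)) : Int) else 0) :
    ∃ d : PySem.Dict Char Int,
      ((PySem.List.pyRange i (text.toList.length : Int)).reverse).foldl (aPlaceStep text)
          ((PySem.List.pyRange 0 (text.toList.length : Int)).map (fun _ => (0 : Int)), d0)
        = ((pvAG text.toList).map (fun v => if (i : Int) ≤ v then v else 0), d)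
      ∧ ∀ c, d.getD c 0 = if c ∈ text.toList then
            (text.toList.countP (fun x => decide (x < c)) : Int)
              + ((text.toList.take i).countP (fun x => x == c) : Int)
          else 0 := by
  obtain ⟨k, hk⟩ : ∃ k, i + k = text.toList.length := ⟨text.toList.length - i, by omega⟩
  clear hi
  revert hk
  induction k generalizing i with
  | zero =>
    intro hk
    have hieq : i = text.toList.length := by omega
    subst hieq
    rw [show PySem.List.pyRange (text.toList.length : Int) (text.toList.length : Int)
        = ([] : List Int) from by simp [PySem.List.pyRange]]
    simp only [List.reverse_nil, List.foldl_nil]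
    refine ⟨d0, ?_, ?_⟩
    · have h1 : (PySem.List.pyRange 0 (text.toList.length : Int)).map (fun _ => (0 : Int))
          = List.replicate text.toList.length 0 :=
        List.eq_replicate_iff.mpr ⟨by simp [PySem.List.pyRange_zero_natCast], fun b hb => by
          obtain ⟨y, _, rfl⟩ := List.mem_map.mp hb; rfl⟩
      have h2 : (pvAG text.toList).map
            (fun v => if ((text.toList.length : Nat) : Int) ≤ v then v else 0)
          = List.replicate text.toList.length 0 :=
        List.eq_replicate_iff.mpr ⟨by rw [List.length_map, pvAG_length], fun b hb => by
          obtain ⟨v, hv, rfl⟩ := List.mem_map.mp hb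
          rw [if_neg]
          have := (pvAG_mem_bounds text.toList v hv).2
          omega⟩
      rw [h1, h2]
    · intro c
      rw [hd0 c]
      by_cases hcc : c ∈ text.toList
      · rw [if_pos hcc, if_pos hcc, List.take_length]
        have hsplit : text.toList.countP (fun x => decide (x ≤ c))
            = text.toList.countP (fun x => decide (x < c))
              + text.toList.countP (fun x => x == c) := by
          rw [show (fun x => decide (x ≤ c)) = (fun x : Char => decide (x < c) || (x == c)) from
            funext (fun x => by
              by_cases h1 : x < c <;> by_cases h2 : x = c <;>
                simp [h1, h2, le_iff_lt_or_eq])]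
          exact countP_disj _ _ _ (fun x hx => by
            have h1 := of_decide_eq_true hx.1
            have h2 := eq_of_beq hx.2
            rw [h2] at h1
            exact lt_irrefl _ h1)
        rw [hsplit]
        push_cast
        ring
      · rw [if_neg hcc, if_neg hcc]
  | succ k ihk =>
    intro hk
    obtain ⟨d, hfold, hd⟩ := ihk (i + 1) (by omega)
    have hilt : i < text.toList.length := by omega
    have hdec : (PySem.List.pyRange (i : Int) (text.toList.length : Int)).reverse
        = (PySem.List.pyRange ((i + 1 : Nat) : Int) (text.toList.length : Int)).reverse
            ++ [(i : Int)] := by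
      rw [show ((i + 1 : Nat) : Int) = (i : Int) + 1 from by push_cast; ring]
      rw [PySem.List.pyRange_one_cons (by push_cast; omega), List.reverse_cons]
    rw [hdec, List.foldl_append, hfold, List.foldl_cons, List.foldl_nil, aPlaceStep_eq]
    try dsimp only
    have hchar : (PySem.Str.pyGet? text (i : Int)).getD ' ' = text.toList[i]'hilt := by
      have h1 : PySem.Str.pyGet? text (i : Int) = PySem.List.pyGet? text.toList (i : Int) := rfl
      rw [h1, PySem.List.pyGet?_natCast, List.getElem?_eq_getElem hilt]
      rfl
    rw [hchar]
    have hdc := hd (text.toList[i]'hilt)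
    rw [if_pos (List.getElem_mem hilt)] at hdc
    have htake1 : (text.toList.take (i + 1)).countP (fun x => x == text.toList[i]'hilt)
        = (text.toList.take i).countP (fun x => x == text.toList[i]'hilt) + 1 := by
      rw [take_succ_of_lt _ i hilt, List.countP_append, List.countP_singleton]
      simp
    rw [hdc, htake1]
    have hjn : (↑(text.toList.countP (fun x => decide (x < text.toList[i]'hilt))) : Int)
        + (↑((text.toList.take i).countP (fun x => x == text.toList[i]'hilt) + 1) : Int) - 1
        = ((text.toList.countP (fun x => decide (x < text.toList[i]'hilt))
            + (text.toList.take i).countP (fun x => x == text.toList[i]'hilt) : Nat) : Int) := by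
      push_cast
      ring
    rw [hjn]
    rw [pySet?_some _ _ _ (by exact_mod_cast Nat.zero_le _) (by
      rw [List.length_map, pvAG_length]
      exact_mod_cast jn_lt text.toList i hilt)]
    rw [show ((text.toList.countP (fun x => decide (x < text.toList[i]'hilt))
        + (text.toList.take i).countP (fun x => x == text.toList[i]'hilt) : Nat) : Int).toNat
        = text.toList.countP (fun x => decide (x < text.toList[i]'hilt))
          + (text.toList.take i).countP (fun x => x == text.toList[i]'hilt) from by omega]
    refine ⟨d.modify (text.toList[i]'hilt) 0 (fun v => v - 1), ?_, ?_⟩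
    · rw [Option.getD_some, set_trunc text.toList i hilt]
    · intro c
      rw [PySem.Dict.getD_modify]
      by_cases hcc : c = text.toList[i]'hilt
      · rw [if_pos hcc]
        rw [if_pos (by rw [hcc]; exact List.getElem_mem hilt)]
        rw [hcc]
        try dsimp only
        rw [hdc, htake1]
        push_cast
        ring
      · rw [if_neg hcc]
        rw [hd c]
        by_cases hcm : c ∈ text.toList
        · rw [if_pos hcm, if_pos hcm]
          have hstep : (text.toList.take (i + 1)).countP (fun x => x == c)
              = (text.toList.take i).countP (fun x => x == c) := by
            rw [take_succ_of_lt _ i hilt, List.countP_append, List.countP_singleton]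
            rw [show (text.toList[i]'hilt == c) = false from
              beq_eq_false_iff_ne.mpr (fun hx => hcc hx.symm)]
            simp
          rw [hstep]
        · rw [if_neg hcm, if_neg hcm]

lemma A_eq_pvAG (text : String) : get_sorted_text text = pvAG text.toList := by
  have hcounter : text.toList.foldl aCountStep PySem.Dict.empty = PySem.Dict.counter text.toList := by
    rw [PySem.Dict.counter_eq_foldl]
    rfl
  have hA : get_sorted_text text
      = (((PySem.List.slice? (PySem.List.pyRange 0 (PySem.Str.len text)) none none (-1)).getD []).foldl
          (aPlaceStep text)
          ((PySem.List.pyRange 0 (PySem.Str.len text)).map (fun _ => (0 : Int)),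
           (PySem.List.enumerate (PySem.List.slice
               (PySem.List.sorted (PySem.Dict.counter text.toList).keys (fun c => c) false)
               (some 1) none)).foldl
             (aCumStep (PySem.List.sorted (PySem.Dict.counter text.toList).keys (fun c => c) false))
             (PySem.Dict.counter text.toList))).1 := by
    unfold get_sorted_text
    rw [hcounter]
  rw [hA]
  rw [show PySem.List.sorted (PySem.Dict.counter text.toList).keys (fun c => c) false
      = pvLetters text.toList from by rw [PySem.Dict.keys_counter]; rfl]
  rw [PySem.Str.len_eq]
  rw [show (PySem.List.slice? (PySem.List.pyRange 0 ((text.toList.length : Nat) : Int)) none none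
        (-1)).getD [] = (PySem.List.pyRange 0 ((text.toList.length : Nat) : Int)).reverse from by
    rw [PySem.List.slice?_none_none_neg_one]
    rfl]
  obtain ⟨d, hfold, _⟩ := place_loop text 0 (by omega)
      ((PySem.List.enumerate (PySem.List.slice (pvLetters text.toList) (some 1) none)).foldl
        (aCumStep (pvLetters text.toList)) (PySem.Dict.counter text.toList))
      (fun c => cum_loop text.toList c)
  simp only [Nat.cast_zero] at hfold
  rw [hfold]
  have hmap : (pvAG text.toList).map (fun v => if (0 : Int) ≤ v then v else 0) = pvAG text.toList :=
    (List.map_congr_left (fun a ha => if_pos ((pvAG_mem_bounds _ a ha).1))).trans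
      (List.map_id _)
  exact hmap

-- ===== VERDICT (by name: the statement is the Claim_ definition above) =====
theorem get_sorted_text_spec : Claim_equal_get_sorted_text := by
  intro text _
  unfold Spec_get_sorted_text get_sorted_text_alt
  rw [A_eq_pvAG, B_eq_pvG]
  rfl
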